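-- pv_equiv track=rewrite | github.com/AdarshSrinivasan1310/Eulerian_max_min | scl package.py | find_all_matchings
-- ===== SOURCE A (Python) =====
-- def find_all_matchings(graph, n):
--     edges = [(i, j) for i in range(n) for j in range(i + 1, n) if graph[i][j] == 1]
--     all_matchings = []
--     def build_matchings(current_matching, remaining_edges, matched_vertices):
--         all_matchings.append(current_matching[:])
--         for i, (u, v) in enumerate(remaining_edges):
--             if u not in matched_vertices and v not in matched_vertices:
--                 build_matchings(current_matching + [(u, v)], remaining_edges[i + 1:], matched_vertices | {u, v})
--     build_matchings([], edges, set())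
--     return all_matchings
-- ===== SOURCE B (Python) =====
-- def find_all_matchings(graph, n):
--     edges = [(i, j) for i in range(n) for j in range(i + 1, n) if graph[i][j] == 1]
--     results = []
--     stack = [([], 0, set())]
--     while stack:
--         cur, start, matched = stack.pop()
--         results.append(cur)
--         children = []
--         for i in range(start, len(edges)):
--             u, v = edges[i]
--             if u not in matched and v not in matched:
--                 children.append((cur + [(u, v)], i + 1, matched | {u, v}))
--         stack.extend(reversed(children))
--     return results
-- ===== Notes on version B (the rewrite author's own statement) =====
-- stated objective: alternative
-- what changed: The recursive build_matchings helper (which slices remaining_edges and mutates a closed-over list) is replaced by an explicit-stack iterative DFS whose frames carry a start index into the single edge list; children are pushed in reverse so pop order reproduces A's preorder.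
import Mathlib
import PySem

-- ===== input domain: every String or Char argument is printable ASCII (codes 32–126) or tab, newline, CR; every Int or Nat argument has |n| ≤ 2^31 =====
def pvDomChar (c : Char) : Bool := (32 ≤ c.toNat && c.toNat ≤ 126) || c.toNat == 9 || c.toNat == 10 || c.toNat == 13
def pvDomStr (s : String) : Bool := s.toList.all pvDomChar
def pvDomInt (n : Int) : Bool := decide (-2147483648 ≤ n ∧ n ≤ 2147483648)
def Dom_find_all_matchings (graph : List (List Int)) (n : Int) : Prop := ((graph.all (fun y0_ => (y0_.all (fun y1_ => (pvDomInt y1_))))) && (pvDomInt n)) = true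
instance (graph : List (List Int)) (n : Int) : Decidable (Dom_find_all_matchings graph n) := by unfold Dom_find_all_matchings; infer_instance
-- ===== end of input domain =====

-- B replaces A's recursive helper by an explicit-stack iterative DFS carrying a start
-- index into the edge list instead of slicing it (objective: alternative decomposition).

-- shared helper: the edge comprehension, the identical first line of both Pythons
def pvEdges (graph : List (List Int)) (n : Int) : List (Int × Int) :=
  (PySem.List.pyRange 0 n 1).flatMap (fun i =>
    (PySem.List.pyRange (i + 1) n 1).flatMap (fun j =>
      if ((PySem.List.pyGet? graph i).bind (fun row => PySem.List.pyGet? row j)) = some 1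
      then [(i, j)] else []))

-- ===== PORT A =====
-- A's recursive build_matchings: the appended-in-preorder list is returned directly;
-- the for-loop over remaining_edges is the mutual helper pvBuildAuxA.
mutual
def pvBuildA (cur : List (Int × Int)) (rem : List (Int × Int)) (matched : PySem.Set Int) :
    List (List (Int × Int)) :=
  cur :: pvBuildAuxA cur rem matched
  termination_by 2 * rem.length + 1

def pvBuildAuxA (cur : List (Int × Int)) (rem : List (Int × Int)) (matched : PySem.Set Int) :
    List (List (Int × Int)) :=
  match rem with
  | [] => []
  | (u, v) :: rest =>
    (if u ∉ matched ∧ v ∉ matched then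
        pvBuildA (cur ++ [(u, v)]) rest (PySem.Set.union matched [u, v])
      else []) ++ pvBuildAuxA cur rest matched
  termination_by 2 * rem.length
end

def find_all_matchings (graph : List (List Int)) (n : Int) : List (List (Int × Int)) :=
  pvBuildA [] (pvEdges graph n) PySem.Set.empty

-- ===== PORT B =====
-- inner for-loop of Source B: collect the extension frames for indices i = start .. len-1
def pvChildren (edges : List (Int × Int)) (cur : List (Int × Int)) (matched : PySem.Set Int)
    (i : Nat) : List (List (Int × Int) × Nat × PySem.Set Int) :=
  if h : i < edges.length then
    let e := edges[i]
    (if e.1 ∉ matched ∧ e.2 ∉ matched then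
        [(cur ++ [e], i + 1, PySem.Set.union matched [e.1, e.2])]
      else []) ++ pvChildren edges cur matched (i + 1)
  else []
  termination_by edges.length - i

-- termination measure for the stack machine
def pvFrameW (len s : Nat) : Nat := 2 ^ (len + 1 - s)
def pvStackW (len : Nat) (st : List (List (Int × Int) × Nat × PySem.Set Int)) : Nat :=
  (st.map (fun f => pvFrameW len f.2.1)).sum

theorem pvChildren_weight (edges : List (Int × Int)) (cur : List (Int × Int))
    (matched : PySem.Set Int) (i : Nat) :
    pvStackW edges.length (pvChildren edges cur matched i) + 1 ≤ pvFrameW edges.length i := by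
  unfold pvChildren
  split
  · next h =>
    have ih := pvChildren_weight edges cur matched (i + 1)
    simp only [pvStackW, List.map_append, List.sum_append] at *
    have h2 : pvFrameW edges.length i = 2 * pvFrameW edges.length (i + 1) := by
      unfold pvFrameW
      have : edges.length + 1 - i = (edges.length + 1 - (i + 1)) + 1 := by omega
      rw [this, pow_succ]; ring
    split
    · simp only [List.map_cons, List.map_nil, List.sum_cons, List.sum_nil]
      omega
    · simp only [List.map_nil, List.sum_nil]; omega
  · simp only [pvStackW, List.map_nil, List.sum_nil]
    have : 1 ≤ pvFrameW edges.length i := Nat.one_le_two_pow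
    omega
  termination_by edges.length - i

-- the while-stack loop of Source B (head of the Lean list = top of the Python stack;
-- stack.extend(reversed(children)) therefore prepends children in order)
def pvRunB (edges : List (Int × Int))
    (stack : List (List (Int × Int) × Nat × PySem.Set Int)) : List (List (Int × Int)) :=
  match stack with
  | [] => []
  | (cur, s, m) :: rest => cur :: pvRunB edges (pvChildren edges cur m s ++ rest)
  termination_by pvStackW edges.length stack
  decreasing_by
    simp only [pvStackW, List.map_append, List.sum_append, List.map_cons, List.sum_cons]
    have := pvChildren_weight edges cur m s
    simp only [pvStackW] at this
    omega

def find_all_matchings_alt (graph : List (List Int)) (n : Int) : List (List (Int × Int)) :=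
  pvRunB (pvEdges graph n) [([], 0, PySem.Set.empty)]

-- ===== PRECONDITION & SPEC =====
-- Pre_ excludes exactly the inputs where A raises IndexError: rows 0..n-2 must exist and
-- have length ≥ n (row n-1 and beyond are never indexed because the inner range is empty).
def Pre_find_all_matchings (graph : List (List Int)) (n : Int) : Prop :=
  n - 1 ≤ (graph.length : Int) ∧
  (graph.take (n - 1).toNat).all (fun r => decide (n ≤ (r.length : Int))) = true
instance (graph : List (List Int)) (n : Int) : Decidable (Pre_find_all_matchings graph n) := by
  unfold Pre_find_all_matchings; infer_instance

def pvWitness_find_all_matchings : List (List Int) × Int :=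
  ([[0, 1, 1], [1, 0, 1], [1, 1, 0]], 3)

def Spec_find_all_matchings (graph : List (List Int)) (n : Int) (out : List (List (Int × Int))) : Prop := out = find_all_matchings_alt graph n
instance (graph : List (List Int)) (n : Int) (out : List (List (Int × Int))) : Decidable (Spec_find_all_matchings graph n out) := by unfold Spec_find_all_matchings; infer_instance

-- ===== CLAIM (what is proved, stated in full; the proofs are below) =====
def Claim_equal_find_all_matchings : Prop := ∀ (graph : List (List Int)) (n : Int), Dom_find_all_matchings graph n → Pre_find_all_matchings graph n → Spec_find_all_matchings graph n (find_all_matchings graph n)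

-- ===== LEMMAS AND PROOFS =====

-- a frame (cur, s, m) of the stack machine stands for A's recursive call on the suffix from s
def pvExpand (edges : List (Int × Int)) (f : List (Int × Int) × Nat × PySem.Set Int) :
    List (List (Int × Int)) :=
  pvBuildA f.1 (edges.drop f.2.1) f.2.2

theorem pvChildren_expand (edges : List (Int × Int)) (cur : List (Int × Int))
    (matched : PySem.Set Int) (i : Nat) :
    (pvChildren edges cur matched i).flatMap (pvExpand edges)
      = pvBuildAuxA cur (edges.drop i) matched := by
  unfold pvChildren
  split
  · next h =>
    have ih := pvChildren_expand edges cur matched (i + 1)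
    rw [List.drop_eq_getElem_cons h]
    rcases hq : edges[i] with ⟨u, v⟩
    simp only [pvBuildAuxA, List.flatMap_append, ih]
    split
    · simp [pvExpand]
    · simp
  · next h =>
    rw [List.drop_eq_nil_of_le (by omega)]
    simp [pvBuildAuxA]
  termination_by edges.length - i

theorem pvRunB_eq_flatMap (edges : List (Int × Int))
    (stack : List (List (Int × Int) × Nat × PySem.Set Int)) :
    pvRunB edges stack = stack.flatMap (pvExpand edges) := by
  match stack with
  | [] => simp [pvRunB]
  | (cur, s, m) :: rest =>
    have ih := pvRunB_eq_flatMap edges (pvChildren edges cur m s ++ rest)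
    rw [pvRunB, ih]
    simp only [List.flatMap_append, List.flatMap_cons, pvChildren_expand]
    show _ = pvExpand edges (cur, s, m) ++ _
    simp [pvExpand, pvBuildA]
  termination_by pvStackW edges.length stack
  decreasing_by
    simp only [pvStackW, List.map_append, List.sum_append, List.map_cons, List.sum_cons]
    have := pvChildren_weight edges cur m s
    simp only [pvStackW] at this
    omega

-- ===== VERDICT (by name: the statement is the Claim_ definition above) =====
theorem find_all_matchings_spec : Claim_equal_find_all_matchings := by
  intro graph n _ _
  unfold Spec_find_all_matchings find_all_matchings find_all_matchings_alt
  rw [pvRunB_eq_flatMap]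
  simp [pvExpand]
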